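-- pv_equiv track=rewrite | github.com/whoDoneItAgain/windows-desktop-builds | src/wdb/__main__.py | map_allowed_deployed
-- ===== SOURCE A (Python) =====
-- from copy import deepcopy
--
-- def recursive_merge(dict1, dict2):
--     for key, value in dict2.items():
--         if key in dict1 and isinstance(dict1[key], dict) and isinstance(value, dict):
--             # Recursively merge nested dictionaries
--             dict1[key] = recursive_merge(dict1[key], value)
--         else:
--             # Merge non-dictionary values
--             dict1[key] = value
--     return dict1
--
-- def map_allowed_deployed(deployed_os_builds, build_allowed_builds, build_os_mappings):
--     release_build_frame: dict = {"current": 0, "aging": 0, "disallowed": 0}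
--     build_map: dict = {}
--
--     # Build Deployment Counts Frame
--     for os_name in build_os_mappings.keys():
--         for release in build_os_mappings[os_name]:
--             for build in build_os_mappings[os_name][release]:
--                 if build in deployed_os_builds:
--                     os_build_frame: dict = {
--                         os_name: {release: deepcopy(release_build_frame)}
--                     }
--
--                     build_map = recursive_merge(build_map, os_build_frame)
--
--     for os_name in build_os_mappings.keys():
--         for release in build_os_mappings[os_name]:
--             for build in build_os_mappings[os_name][release]:
--                 if build in deployed_os_builds:
--                     for classification in build_allowed_builds.keys():
--                         if build in build_allowed_builds[classification]:
--                             new_count = (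
--                                 build_map[os_name][release][classification]
--                                 + deployed_os_builds[build]
--                             )
--
--                             build_map[os_name][release][classification] = new_count
--
--     return build_map
-- ===== SOURCE B (Python) =====
-- def map_allowed_deployed(deployed_os_builds, build_allowed_builds, build_os_mappings):
--     build_map = {}
--     for os_name, releases in build_os_mappings.items():
--         for release, builds in releases.items():
--             for build in builds:
--                 if build in deployed_os_builds:
--                     frame = build_map.setdefault(os_name, {}).setdefault(
--                         release, {"current": 0, "aging": 0, "disallowed": 0}
--                     )
--                     count = deployed_os_builds[build]
--                     for classification, allowed in build_allowed_builds.items():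
--                         if build in allowed:
--                             frame[classification] += count
--     return build_map
-- ===== Notes on version B (the rewrite author's own statement) =====
-- stated objective: simpler
-- what changed: One fused pass that lazily creates each zeroed os/release frame with setdefault and adds the deployed count per matching classification immediately, eliminating A's deepcopy, recursive_merge and the second full traversal.
import Mathlib
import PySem

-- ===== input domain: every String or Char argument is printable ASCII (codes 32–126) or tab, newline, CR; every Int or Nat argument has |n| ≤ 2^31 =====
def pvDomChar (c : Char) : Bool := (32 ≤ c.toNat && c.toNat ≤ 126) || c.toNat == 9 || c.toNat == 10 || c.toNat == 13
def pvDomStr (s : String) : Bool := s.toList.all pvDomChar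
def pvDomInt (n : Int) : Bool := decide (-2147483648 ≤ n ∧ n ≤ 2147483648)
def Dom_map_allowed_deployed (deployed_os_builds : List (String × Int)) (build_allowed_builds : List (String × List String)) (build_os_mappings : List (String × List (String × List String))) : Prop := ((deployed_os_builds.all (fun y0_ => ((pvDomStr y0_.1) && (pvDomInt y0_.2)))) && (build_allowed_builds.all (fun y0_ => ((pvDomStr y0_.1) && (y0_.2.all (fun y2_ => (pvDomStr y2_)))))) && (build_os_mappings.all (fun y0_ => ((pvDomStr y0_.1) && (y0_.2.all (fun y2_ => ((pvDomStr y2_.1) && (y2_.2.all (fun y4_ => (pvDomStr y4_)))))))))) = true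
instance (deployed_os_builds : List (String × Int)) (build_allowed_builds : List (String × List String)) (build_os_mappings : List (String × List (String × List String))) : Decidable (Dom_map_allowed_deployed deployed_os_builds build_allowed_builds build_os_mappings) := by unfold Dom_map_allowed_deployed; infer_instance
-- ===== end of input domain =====

-- B replaces A's two full traversals (zero-frame merging via deepcopy + recursive_merge, then a
-- counting pass) by ONE fused pass using setdefault; equivalence is about the RETURN value
-- (Python A and B only mutate their own local dict).

-- ===== PORT A =====
-- The zeroed release frame {"current": 0, "aging": 0, "disallowed": 0}.
def pvFrame : PySem.Dict String Int := PySem.Dict.ofList [("current", 0), ("aging", 0), ("disallowed", 0)]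

-- recursive_merge, specialized to the three nesting levels that actually occur (Python's
-- isinstance tests resolve statically: at the innermost level values are ints, so it overwrites).
def pvMerge3 (d1 d2 : PySem.Dict String Int) : PySem.Dict String Int :=
  d2.items.foldl (fun acc kv => acc.insert kv.1 kv.2) d1

def pvMerge2 (d1 d2 : PySem.Dict String (PySem.Dict String Int)) : PySem.Dict String (PySem.Dict String Int) :=
  d2.items.foldl (fun acc kv =>
    match acc.get? kv.1 with
    | some w => acc.insert kv.1 (pvMerge3 w kv.2)
    | none   => acc.insert kv.1 kv.2) d1

def pvMerge1 (d1 d2 : PySem.Dict String (PySem.Dict String (PySem.Dict String Int))) : PySem.Dict String (PySem.Dict String (PySem.Dict String Int)) :=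
  d2.items.foldl (fun acc kv =>
    match acc.get? kv.1 with
    | some w => acc.insert kv.1 (pvMerge2 w kv.2)
    | none   => acc.insert kv.1 kv.2) d1

-- A, step for step.  The dict arguments are normalized with PySem.Dict.ofList (Python receives
-- them as dicts: duplicate keys overwrite in place); 'for k in d' + 'd[k]' = iterate d.items.
-- 'build_map[os][rel][cls]' is read with getD; the defaults are never consulted inside
-- Pre_map_allowed_deployed (outside it Python raises KeyError there).
def map_allowed_deployed (deployed_os_builds : List (String × Int)) (build_allowed_builds : List (String × List String)) (build_os_mappings : List (String × List (String × List String))) : List (String × List (String × List (String × Int))) :=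
  let dep := PySem.Dict.ofList deployed_os_builds
  let al := PySem.Dict.ofList build_allowed_builds
  let mp := PySem.Dict.ofList (build_os_mappings.map (fun p => (p.1, PySem.Dict.ofList p.2)))
  -- Build Deployment Counts Frame (first triple loop: merge zeroed frames)
  let bm1 := mp.items.foldl (fun bm p =>
    p.2.items.foldl (fun bm q =>
      q.2.foldl (fun bm b =>
        if dep.contains b then
          pvMerge1 bm (PySem.Dict.ofList [(p.1, PySem.Dict.ofList [(q.1, pvFrame)])])
        else bm) bm) bm) PySem.Dict.empty
  -- second triple loop: add deployed counts per classification
  let bm2 := mp.items.foldl (fun bm p =>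
    p.2.items.foldl (fun bm q =>
      q.2.foldl (fun bm b =>
        if dep.contains b then
          al.items.foldl (fun bm c =>
            if c.2.contains b then
              let d2 := bm.getD p.1 PySem.Dict.empty
              let d3 := d2.getD q.1 PySem.Dict.empty
              bm.insert p.1 (d2.insert q.1 (d3.insert c.1 (d3.getD c.1 0 + dep.getD b 0)))
            else bm) bm
        else bm) bm) bm) bm1
  bm2.items.map (fun p => (p.1, p.2.items.map (fun q => (q.1, q.2.items))))

-- ===== PORT B =====
-- B (Source B), step for step: one pass; 'frame = build_map.setdefault(os,{}).setdefault(rel,frame0)'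
-- then in-place '+=' on frame; the write-back inserts make Python's aliasing mutation explicit.
def map_allowed_deployed_alt (deployed_os_builds : List (String × Int)) (build_allowed_builds : List (String × List String)) (build_os_mappings : List (String × List (String × List String))) : List (String × List (String × List (String × Int))) :=
  let dep := PySem.Dict.ofList deployed_os_builds
  let al := PySem.Dict.ofList build_allowed_builds
  let mp := PySem.Dict.ofList (build_os_mappings.map (fun p => (p.1, PySem.Dict.ofList p.2)))
  let bm := mp.items.foldl (fun bm p =>
    p.2.items.foldl (fun bm q =>
      q.2.foldl (fun bm b =>
        if dep.contains b then
          let bm1 := bm.setdefault p.1 PySem.Dict.empty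
          let d2 := (bm1.getD p.1 PySem.Dict.empty).setdefault q.1 pvFrame
          let fr := d2.getD q.1 pvFrame
          let cnt := dep.getD b 0
          let fr' := al.items.foldl (fun f c =>
            if c.2.contains b then f.insert c.1 (f.getD c.1 0 + cnt) else f) fr
          bm1.insert p.1 (d2.insert q.1 fr')
        else bm) bm) bm) PySem.Dict.empty
  bm.items.map (fun p => (p.1, p.2.items.map (fun q => (q.1, q.2.items))))

-- ===== PRECONDITION & SPEC =====
-- Pre_ excludes exactly the inputs on which Python A raises KeyError (and Python B raises the
-- same KeyError): some build that occurs in the mappings and is deployed lies in an allowed list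
-- whose classification key is none of "current"/"aging"/"disallowed".
def Pre_map_allowed_deployed (deployed_os_builds : List (String × Int)) (build_allowed_builds : List (String × List String)) (build_os_mappings : List (String × List (String × List String))) : Prop :=
  ∀ p ∈ (PySem.Dict.ofList (build_os_mappings.map (fun p => (p.1, PySem.Dict.ofList p.2)))).items,
    ∀ q ∈ p.2.items, ∀ b ∈ q.2,
      (PySem.Dict.ofList deployed_os_builds).contains b = true →
        ∀ c ∈ (PySem.Dict.ofList build_allowed_builds).items, b ∈ c.2 →
          (c.1 = "current" ∨ c.1 = "aging" ∨ c.1 = "disallowed")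
instance (deployed_os_builds : List (String × Int)) (build_allowed_builds : List (String × List String)) (build_os_mappings : List (String × List (String × List String))) : Decidable (Pre_map_allowed_deployed deployed_os_builds build_allowed_builds build_os_mappings) := by unfold Pre_map_allowed_deployed; infer_instance

def pvWitness_map_allowed_deployed : (List (String × Int)) × (List (String × List String)) × (List (String × List (String × List String))) :=
  ([("b1", 3), ("b2", 5)], [("current", ["b1"]), ("aging", ["b1", "b2"]), ("disallowed", [])],
   [("win", [("r1", ["b1", "b2", "bX"]), ("r2", ["b2"])]), ("mac", [("r1", ["b1"])])])

def Spec_map_allowed_deployed (deployed_os_builds : List (String × Int)) (build_allowed_builds : List (String × List String)) (build_os_mappings : List (String × List (String × List String))) (out : List (String × List (String × List (String × Int)))) : Prop := out = map_allowed_deployed_alt deployed_os_builds build_allowed_builds build_os_mappings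
instance (deployed_os_builds : List (String × Int)) (build_allowed_builds : List (String × List String)) (build_os_mappings : List (String × List (String × List String))) (out : List (String × List (String × List (String × Int)))) : Decidable (Spec_map_allowed_deployed deployed_os_builds build_allowed_builds build_os_mappings out) := by unfold Spec_map_allowed_deployed; infer_instance

-- ===== CLAIM (what is proved, stated in full; the proofs are below) =====
def Claim_equal_map_allowed_deployed : Prop := ∀ (deployed_os_builds : List (String × Int)) (build_allowed_builds : List (String × List String)) (build_os_mappings : List (String × List (String × List String))), Dom_map_allowed_deployed deployed_os_builds build_allowed_builds build_os_mappings → Pre_map_allowed_deployed deployed_os_builds build_allowed_builds build_os_mappings → Spec_map_allowed_deployed deployed_os_builds build_allowed_builds build_os_mappings (map_allowed_deployed deployed_os_builds build_allowed_builds build_os_mappings)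


-- ===== LEMMAS AND PROOFS =====

-- abbreviations for the three nesting levels of the build map
abbrev pvD3 := PySem.Dict String Int
abbrev pvD2 := PySem.Dict String pvD3
abbrev pvD1 := PySem.Dict String pvD2

-- the (os, release, build) triples both ports traverse, in traversal order
def pvTriples (mp : PySem.Dict String (PySem.Dict String (List String))) : List (String × String × String) :=
  mp.items.flatMap (fun p => p.2.items.flatMap (fun q => q.2.map (fun b => (p.1, q.1, b))))

-- per-triple step of A's first pass (zero-frame merging)
def pvStepM (dep : pvD3) (bm : pvD1) (t : String × String × String) : pvD1 :=
  if dep.contains t.2.2 then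
    pvMerge1 bm (PySem.Dict.ofList [(t.1, PySem.Dict.ofList [(t.2.1, pvFrame)])])
  else bm

-- setdefault formulation of the same step
def pvStepSd (dep : pvD3) (bm : pvD1) (t : String × String × String) : pvD1 :=
  if dep.contains t.2.2 then
    bm.insert t.1 ((bm.getD t.1 PySem.Dict.empty).setdefault t.2.1 pvFrame)
  else bm

-- per-triple step of A's second pass (counting)
def pvStepA (dep : pvD3) (al : PySem.Dict String (List String)) (bm : pvD1) (t : String × String × String) : pvD1 :=
  if dep.contains t.2.2 then
    al.items.foldl (fun bm c =>
      if c.2.contains t.2.2 then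
        let d2 := bm.getD t.1 PySem.Dict.empty
        let d3 := d2.getD t.2.1 PySem.Dict.empty
        bm.insert t.1 (d2.insert t.2.1 (d3.insert c.1 (d3.getD c.1 0 + dep.getD t.2.2 0)))
      else bm) bm
  else bm

-- per-triple step of B
def pvStepB (dep : pvD3) (al : PySem.Dict String (List String)) (bm : pvD1) (t : String × String × String) : pvD1 :=
  if dep.contains t.2.2 then
    let bm1 := bm.setdefault t.1 PySem.Dict.empty
    let d2 := (bm1.getD t.1 PySem.Dict.empty).setdefault t.2.1 pvFrame
    let fr := d2.getD t.2.1 pvFrame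
    let cnt := dep.getD t.2.2 0
    let fr' := al.items.foldl (fun f c =>
      if c.2.contains t.2.2 then f.insert c.1 (f.getD c.1 0 + cnt) else f) fr
    bm1.insert t.1 (d2.insert t.2.1 fr')
  else bm

-- the frame update B performs (and A performs path-wise)
def pvAddF (dep : pvD3) (al : PySem.Dict String (List String)) (b : String) (f : pvD3) : pvD3 :=
  al.items.foldl (fun f c => if c.2.contains b then f.insert c.1 (f.getD c.1 0 + dep.getD b 0) else f) f

-- invariants
def pvND (bm : pvD1) : Prop := bm.keys.Nodup ∧ ∀ os d2, bm.get? os = some d2 → d2.keys.Nodup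
def pvZero (bm : pvD1) : Prop := ∀ os d2, bm.get? os = some d2 → ∀ r f, d2.get? r = some f → f = pvFrame
def pvPath (dep : pvD3) (bm : pvD1) (t : String × String × String) : Prop :=
  dep.contains t.2.2 = true → ∃ d2 f, bm.get? t.1 = some d2 ∧ d2.get? t.2.1 = some f

-- generic Dict facts not in the PySem book
theorem pvContainsOfGet? {ν : Type} (d : PySem.Dict String ν) {k : String} {v : ν}
    (h : d.get? k = some v) : d.contains k = true := by
  rw [PySem.Dict.contains_eq_isSome_get?, h]; rfl

theorem pvInsertSelf {ν : Type} (d : PySem.Dict String ν) (k : String) (v : ν)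
    (hnd : d.keys.Nodup) (h : d.get? k = some v) : d.insert k v = d := by
  apply PySem.Dict.ext
  rw [PySem.Dict.items_insert_of_contains _ _ (pvContainsOfGet? d h)]
  have hp : ∀ p ∈ d.items, (if (p.1 == k) = true then (k, v) else p) = id p := by
    intro p hp
    by_cases hpk : p.1 = k
    · have hg2 : d.get? p.1 = some p.2 := PySem.Dict.get?_of_mem_items d hp hnd
      rw [hpk, h] at hg2
      simp only [id]
      rw [if_pos (by simp [hpk]), Prod.ext_iff]
      exact ⟨hpk.symm, Option.some_inj.mp hg2⟩
    · simp [hpk]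
  rw [List.map_congr_left hp, List.map_id]

theorem pvInsertComm {ν : Type} (d : PySem.Dict String ν) (k k' : String) (v v' : ν)
    (hne : k ≠ k') (hc : d.contains k = true) :
    (d.insert k v).insert k' v' = (d.insert k' v').insert k v := by
  have hkk : (k' == k) = false := by simp [Ne.symm hne]
  have hkk' : (k == k') = false := by simp [hne]
  by_cases hc' : d.contains k' = true
  · apply PySem.Dict.ext
    rw [PySem.Dict.items_insert_of_contains _ v' (by rw [PySem.Dict.contains_insert]; simp [hkk, hc']),
        PySem.Dict.items_insert_of_contains _ v hc,
        PySem.Dict.items_insert_of_contains _ v (by rw [PySem.Dict.contains_insert]; simp [hkk', hc]),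
        PySem.Dict.items_insert_of_contains _ v' hc',
        List.map_map, List.map_map]
    apply List.map_congr_left
    intro p _
    by_cases h1 : p.1 = k
    · simp [Function.comp, h1, hne]
    · by_cases h2 : p.1 = k'
      · simp [Function.comp, h2, Ne.symm hne]
      · simp [Function.comp, h1, h2]
  · have hc'' : d.contains k' = false := by simpa using hc'
    apply PySem.Dict.ext
    rw [PySem.Dict.items_insert_of_not_contains _ v' (by rw [PySem.Dict.contains_insert]; simp [hkk, hc'']),
        PySem.Dict.items_insert_of_contains _ v hc,
        PySem.Dict.items_insert_of_contains _ v (by rw [PySem.Dict.contains_insert]; simp [hkk', hc]),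
        PySem.Dict.items_insert_of_not_contains _ v' hc'',
        List.map_append]
    simp
    intro he
    exact absurd he (Ne.symm hne)

-- nested foldl over the dict-of-dict-of-list structure = flat foldl over the triples
theorem pvFoldNestInner {S : Type} (f : S → String × String × String → S) (os r : String)
    (bs : List String) (z : S) :
    bs.foldl (fun bm b => f bm (os, r, b)) z = (bs.map (fun b => (os, r, b))).foldl f z := by
  rw [List.foldl_map]

theorem pvFoldNestMid {S : Type} (f : S → String × String × String → S) (os : String)
    (l : List (String × List String)) (z : S) :
    l.foldl (fun bm q => q.2.foldl (fun bm b => f bm (os, q.1, b)) bm) z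
      = (l.flatMap (fun q => q.2.map (fun b => (os, q.1, b)))).foldl f z := by
  induction l generalizing z with
  | nil => rfl
  | cons q l ih =>
    simp only [List.foldl_cons, List.flatMap_cons, List.foldl_append]
    rw [← pvFoldNestInner, ih]

theorem pvFoldNestL {S : Type} (f : S → String × String × String → S)
    (l : List (String × PySem.Dict String (List String))) (z : S) :
    l.foldl (fun bm p => p.2.items.foldl (fun bm q => q.2.foldl (fun bm b => f bm (p.1, q.1, b)) bm) bm) z
      = (l.flatMap (fun p => p.2.items.flatMap (fun q => q.2.map (fun b => (p.1, q.1, b))))).foldl f z := by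
  induction l generalizing z with
  | nil => rfl
  | cons p l ih =>
    simp only [List.foldl_cons, List.flatMap_cons, List.foldl_append]
    rw [← pvFoldNestMid, ih]

-- A's inner classification loop, characterized path-wise

theorem pvInnerA (dep : pvD3) (b os r : String) (L : List (String × List String)) :
    ∀ (bm : pvD1) (d2 : pvD2) (f : pvD3), bm.keys.Nodup → d2.keys.Nodup →
      bm.get? os = some d2 → d2.get? r = some f →
      L.foldl (fun bm c =>
        if c.2.contains b then
          let D2 := bm.getD os PySem.Dict.empty
          let D3 := D2.getD r PySem.Dict.empty
          bm.insert os (D2.insert r (D3.insert c.1 (D3.getD c.1 0 + dep.getD b 0)))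
        else bm) bm
      = bm.insert os (d2.insert r (L.foldl (fun f c =>
          if c.2.contains b then f.insert c.1 (f.getD c.1 0 + dep.getD b 0) else f) f)) := by
  induction L with
  | nil =>
    intro bm d2 f hbm hd2 h1 h2
    simp only [List.foldl_nil]
    rw [pvInsertSelf _ _ _ hd2 h2, pvInsertSelf _ _ _ hbm h1]
  | cons c L ih =>
    intro bm d2 f hbm hd2 h1 h2
    simp only [List.foldl_cons]
    by_cases hc : c.2.contains b = true
    · simp only [hc, if_true]
      rw [PySem.Dict.getD_of_get?_eq_some _ _ h1, PySem.Dict.getD_of_get?_eq_some _ _ h2]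
      rw [ih _ _ _ (PySem.Dict.nodup_keys_insert _ _ _ hbm)
            (PySem.Dict.nodup_keys_insert _ _ _ hd2)
            (PySem.Dict.get?_insert_self _ _ _) (PySem.Dict.get?_insert_self _ _ _)]
      rw [PySem.Dict.insert_insert_self, PySem.Dict.insert_insert_self]
    · simp only [hc]
      exact ih _ _ _ hbm hd2 h1 h2

theorem pvCharA (dep : pvD3) (al : PySem.Dict String (List String)) (bm : pvD1)
    (os r b : String) (d2 : pvD2) (f : pvD3) (hnd : pvND bm)
    (h1 : bm.get? os = some d2) (h2 : d2.get? r = some f) (hg : dep.contains b = true) :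
    pvStepA dep al bm (os, r, b) = bm.insert os (d2.insert r (pvAddF dep al b f)) := by
  unfold pvStepA pvAddF
  simp only [hg, if_true]
  exact pvInnerA dep b os r al.items bm d2 f hnd.1 (hnd.2 _ _ h1) h1 h2

-- invariant preservation
theorem pvGetDNodup (bm : pvD1) (os : String) (hnd : pvND bm) :
    (bm.getD os PySem.Dict.empty).keys.Nodup := by
  cases h : bm.get? os with
  | none =>
    rw [PySem.Dict.getD_of_not_contains _ _ (by rw [PySem.Dict.contains_eq_isSome_get?, h]; rfl)]
    exact PySem.Dict.nodup_keys_empty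
  | some w =>
    rw [PySem.Dict.getD_of_get?_eq_some _ _ h]
    exact hnd.2 _ _ h

theorem pvSdNodup (d : pvD2) (r : String) (f : pvD3) (h : d.keys.Nodup) :
    (d.setdefault r f).keys.Nodup := by
  by_cases hc : d.contains r = true
  · rw [PySem.Dict.setdefault_of_contains _ _ hc]; exact h
  · rw [PySem.Dict.setdefault_of_not_contains _ _ (by simpa using hc)]
    exact PySem.Dict.nodup_keys_insert _ _ _ h

theorem pvNDInsert (bm : pvD1) (os : String) (v2 : pvD2) (hnd : pvND bm)
    (h : v2.keys.Nodup) : pvND (bm.insert os v2) := by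
  refine ⟨PySem.Dict.nodup_keys_insert _ _ _ hnd.1, ?_⟩
  intro os' d2' hget
  rw [PySem.Dict.get?_insert] at hget
  split_ifs at hget with he
  · exact (Option.some_inj.mp hget) ▸ h
  · exact hnd.2 _ _ hget

theorem pvNDStepSd (dep : pvD3) (bm : pvD1) (t : String × String × String) (hnd : pvND bm) :
    pvND (pvStepSd dep bm t) := by
  unfold pvStepSd
  split_ifs with hg
  · exact pvNDInsert _ _ _ hnd (pvSdNodup _ _ _ (pvGetDNodup _ _ hnd))
  · exact hnd

theorem pvNDFoldA (dep : pvD3) (b os r : String) (L : List (String × List String)) :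
    ∀ (bm : pvD1), pvND bm →
      pvND (L.foldl (fun bm c =>
        if c.2.contains b then
          let D2 := bm.getD os PySem.Dict.empty
          let D3 := D2.getD r PySem.Dict.empty
          bm.insert os (D2.insert r (D3.insert c.1 (D3.getD c.1 0 + dep.getD b 0)))
        else bm) bm) := by
  induction L with
  | nil => intro bm hnd; exact hnd
  | cons c L ih =>
    intro bm hnd
    simp only [List.foldl_cons]
    by_cases hc : c.2.contains b = true
    · simp only [hc, if_true]
      exact ih _ (pvNDInsert _ _ _ hnd
        (PySem.Dict.nodup_keys_insert _ _ _ (pvGetDNodup _ _ hnd)))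
    · simp only [hc]; exact ih _ hnd

theorem pvNDStepA (dep : pvD3) (al : PySem.Dict String (List String)) (bm : pvD1)
    (t : String × String × String) (hnd : pvND bm) : pvND (pvStepA dep al bm t) := by
  unfold pvStepA
  split_ifs with hg
  · exact pvNDFoldA dep t.2.2 t.1 t.2.1 al.items bm hnd
  · exact hnd

theorem pvZeroStepSd (dep : pvD3) (bm : pvD1) (t : String × String × String) (hz : pvZero bm) :
    pvZero (pvStepSd dep bm t) := by
  unfold pvStepSd
  split_ifs with hg
  · intro os' d2' hget r' f' hget'
    rw [PySem.Dict.get?_insert] at hget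
    split_ifs at hget with he
    · cases Option.some_inj.mp hget
      have hX : ∀ r' f', (bm.getD t.1 PySem.Dict.empty).get? r' = some f' → f' = pvFrame := by
        intro r' f' h
        cases hb : bm.get? t.1 with
        | none =>
          rw [PySem.Dict.getD_of_not_contains _ _
            (by rw [PySem.Dict.contains_eq_isSome_get?, hb]; rfl)] at h
          rw [PySem.Dict.get?_empty] at h; cases h
        | some w =>
          rw [PySem.Dict.getD_of_get?_eq_some _ _ hb] at h
          exact hz _ _ hb _ _ h
      by_cases hc : (bm.getD t.1 PySem.Dict.empty).contains t.2.1 = true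
      · rw [PySem.Dict.setdefault_of_contains _ _ hc] at hget'
        exact hX _ _ hget'
      · rw [PySem.Dict.setdefault_of_not_contains _ _ (by simpa using hc)] at hget'
        rw [PySem.Dict.get?_insert] at hget'
        split_ifs at hget' with he'
        · exact (Option.some_inj.mp hget').symm
        · exact hX _ _ hget'
    · exact hz _ _ hget _ _ hget'
  · exact hz

theorem pvStepMeqSd (dep : pvD3) (bm : pvD1) (t : String × String × String)
    (hnd : pvND bm) (hz : pvZero bm) : pvStepM dep bm t = pvStepSd dep bm t := by
  unfold pvStepM pvStepSd
  split_ifs with hg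
  · show pvMerge1 bm (PySem.Dict.empty.insert t.1 (PySem.Dict.empty.insert t.2.1 pvFrame)) = _
    unfold pvMerge1
    rw [PySem.Dict.items_insert_of_not_contains _ _ (PySem.Dict.contains_empty _)]
    show (match bm.get? t.1 with
      | some w => bm.insert t.1 (pvMerge2 w (PySem.Dict.empty.insert t.2.1 pvFrame))
      | none => bm.insert t.1 (PySem.Dict.empty.insert t.2.1 pvFrame)) = _
    cases hb : bm.get? t.1 with
    | none =>
      rw [PySem.Dict.getD_of_not_contains _ _
        (by rw [PySem.Dict.contains_eq_isSome_get?, hb]; rfl)]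
      rw [PySem.Dict.setdefault_of_not_contains _ _ (PySem.Dict.contains_empty _)]
    | some w =>
      rw [PySem.Dict.getD_of_get?_eq_some _ _ hb]
      unfold pvMerge2
      rw [PySem.Dict.items_insert_of_not_contains _ _ (PySem.Dict.contains_empty _)]
      show bm.insert t.1 (match w.get? t.2.1 with
        | some w3 => w.insert t.2.1 (pvMerge3 w3 pvFrame)
        | none => w.insert t.2.1 pvFrame) = _
      cases hw : w.get? t.2.1 with
      | none =>
        rw [PySem.Dict.setdefault_of_not_contains _ _
          (by rw [PySem.Dict.contains_eq_isSome_get?, hw]; rfl)]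
      | some w3 =>
        show bm.insert t.1 (w.insert t.2.1 (pvMerge3 w3 pvFrame)) = _
        have h3 : w3 = pvFrame := hz _ _ hb _ _ hw
        have hm : pvMerge3 pvFrame pvFrame = pvFrame := by decide
        rw [h3, hm, PySem.Dict.setdefault_of_contains _ _ (pvContainsOfGet? w hw),
            pvInsertSelf _ _ _ (hnd.2 _ _ hb) (h3 ▸ hw)]
  · rfl

theorem pvPathStepSdSelf (dep : pvD3) (bm : pvD1) (t : String × String × String) :
    pvPath dep (pvStepSd dep bm t) t := by
  intro hg
  unfold pvStepSd
  simp only [hg, if_true]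
  exact ⟨_, _, PySem.Dict.get?_insert_self _ _ _, PySem.Dict.get?_setdefault_self _ _ _⟩

theorem pvPathStepSdMono (dep : pvD3) (bm : pvD1) (s t : String × String × String)
    (hp : pvPath dep bm t) : pvPath dep (pvStepSd dep bm s) t := by
  obtain ⟨s1, s2, s3⟩ := s
  obtain ⟨t1, t2, t3⟩ := t
  intro hg
  obtain ⟨d2, f, h1, h2⟩ := hp hg
  unfold pvStepSd
  split_ifs with hg'
  · by_cases hos : t1 = s1
    · subst hos
      rw [PySem.Dict.getD_of_get?_eq_some _ _ h1]
      refine ⟨_, f, PySem.Dict.get?_insert_self _ _ _, ?_⟩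
      by_cases hc : d2.contains s2 = true
      · rw [PySem.Dict.setdefault_of_contains _ _ hc]; exact h2
      · have hne : t2 ≠ s2 := fun he => hc (he ▸ pvContainsOfGet? d2 h2)
        rw [PySem.Dict.setdefault_of_not_contains _ _ (by simpa using hc),
            PySem.Dict.get?_insert_of_ne _ _ hne]
        exact h2
    · exact ⟨d2, f, by rw [PySem.Dict.get?_insert_of_ne _ _ hos]; exact h1, h2⟩
  · exact ⟨d2, f, h1, h2⟩

theorem pvStepBeq (dep : pvD3) (al : PySem.Dict String (List String)) (bm : pvD1)
    (t : String × String × String) (hnd : pvND bm) :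
    pvStepB dep al bm t = pvStepA dep al (pvStepSd dep bm t) t := by
  unfold pvStepB pvStepSd
  split_ifs with hg
  · have hbm1getD : (bm.setdefault t.1 PySem.Dict.empty).getD t.1 PySem.Dict.empty
        = bm.getD t.1 PySem.Dict.empty := by
      by_cases hc : bm.contains t.1 = true
      · rw [PySem.Dict.setdefault_of_contains _ _ hc]
      · rw [PySem.Dict.setdefault_of_not_contains _ _ (by simpa using hc),
            PySem.Dict.getD_insert_self,
            PySem.Dict.getD_of_not_contains _ _ (by simpa using hc)]
    have hbm1ins : ∀ (Y : pvD2), (bm.setdefault t.1 PySem.Dict.empty).insert t.1 Y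
        = bm.insert t.1 Y := by
      intro Y
      by_cases hc : bm.contains t.1 = true
      · rw [PySem.Dict.setdefault_of_contains _ _ hc]
      · rw [PySem.Dict.setdefault_of_not_contains _ _ (by simpa using hc),
            PySem.Dict.insert_insert_self]
    simp only [hbm1getD, hbm1ins]
    set X := bm.getD t.1 PySem.Dict.empty with hX
    set d2 := X.setdefault t.2.1 pvFrame with hd2
    have h2 : d2.get? t.2.1 = some (d2.getD t.2.1 pvFrame) := by
      rw [PySem.Dict.get?_setdefault_self, PySem.Dict.getD_eq_get?_getD,
          PySem.Dict.get?_setdefault_self]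
      rfl
    have hndins : pvND (bm.insert t.1 d2) :=
      pvNDInsert _ _ _ hnd (pvSdNodup _ _ _ (pvGetDNodup _ _ hnd))
    rw [pvCharA dep al (bm.insert t.1 d2) t.1 t.2.1 t.2.2 d2 (d2.getD t.2.1 pvFrame)
          hndins (PySem.Dict.get?_insert_self _ _ _) h2 hg]
    rw [PySem.Dict.insert_insert_self]
    rfl
  · unfold pvStepA
    simp [hg]

theorem pvComm (dep : pvD3) (al : PySem.Dict String (List String)) (bm : pvD1)
    (t s : String × String × String) (hnd : pvND bm) (hp : pvPath dep bm t) :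
    pvStepSd dep (pvStepA dep al bm t) s = pvStepA dep al (pvStepSd dep bm s) t := by
  obtain ⟨t1, t2, t3⟩ := t
  obtain ⟨s1, s2, s3⟩ := s
  by_cases hg : dep.contains t3 = true
  · by_cases hg' : dep.contains s3 = true
    · obtain ⟨d2, f, h1, h2⟩ := hp hg
      have hcr : d2.contains t2 = true := pvContainsOfGet? d2 h2
      rw [pvCharA dep al bm t1 t2 t3 d2 f hnd h1 h2 hg]
      unfold pvStepSd
      rw [if_pos hg', if_pos hg']
      dsimp only
      by_cases hos : s1 = t1
      · rw [hos, PySem.Dict.getD_insert_self, PySem.Dict.insert_insert_self,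
            PySem.Dict.getD_of_get?_eq_some _ _ h1]
        by_cases hc : d2.contains s2 = true
        · rw [PySem.Dict.setdefault_of_contains _ _ hc,
              PySem.Dict.setdefault_of_contains _ _
                (show (d2.insert t2 (pvAddF dep al t3 f)).contains s2 = true by
                  rw [PySem.Dict.contains_insert]; simp [hc]),
              pvCharA dep al (bm.insert t1 d2) t1 t2 t3 d2 f
                (pvNDInsert _ _ _ hnd (hnd.2 _ _ h1)) (PySem.Dict.get?_insert_self _ _ _) h2 hg,
              PySem.Dict.insert_insert_self]
        · have hne : s2 ≠ t2 := fun he => hc (he ▸ hcr)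
          rw [PySem.Dict.setdefault_of_not_contains (d := d2.insert t2 (pvAddF dep al t3 f))
                (v := pvFrame) (by rw [PySem.Dict.contains_insert]; simp [hne, hc]),
              PySem.Dict.setdefault_of_not_contains (d := d2) (v := pvFrame) (by simpa using hc),
              pvCharA dep al (bm.insert t1 (d2.insert s2 pvFrame)) t1 t2 t3
                (d2.insert s2 pvFrame) f
                (pvNDInsert _ _ _ hnd (PySem.Dict.nodup_keys_insert _ _ _ (hnd.2 _ _ h1)))
                (PySem.Dict.get?_insert_self _ _ _)
                (by rw [PySem.Dict.get?_insert_of_ne _ _ (Ne.symm hne)]; exact h2) hg,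
              PySem.Dict.insert_insert_self,
              pvInsertComm d2 t2 s2 (pvAddF dep al t3 f) pvFrame (Ne.symm hne) hcr]
      · have hcos : bm.contains t1 = true := pvContainsOfGet? bm h1
        rw [PySem.Dict.getD_insert_of_ne _ _ _ hos,
            pvCharA dep al
              (bm.insert s1 ((bm.getD s1 PySem.Dict.empty).setdefault s2 pvFrame)) t1 t2 t3 d2 f
              (pvNDInsert _ _ _ hnd (pvSdNodup _ _ _ (pvGetDNodup _ _ hnd)))
              (by rw [PySem.Dict.get?_insert_of_ne _ _ (fun he => hos he.symm)]; exact h1) h2 hg,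
            pvInsertComm bm t1 s1 (d2.insert t2 (pvAddF dep al t3 f))
              ((bm.getD s1 PySem.Dict.empty).setdefault s2 pvFrame) (fun he => hos he.symm) hcos]
    · have hgf : dep.contains s3 = false := by simpa using hg'
      simp [pvStepSd, hgf]
  · have hgf : dep.contains t3 = false := by simpa using hg
    simp [pvStepA, hgf]

theorem pvFoldSdComm (dep : pvD3) (al : PySem.Dict String (List String))
    (T : List (String × String × String)) :
    ∀ (bm : pvD1) (t : String × String × String), pvND bm → pvPath dep bm t →
      T.foldl (pvStepSd dep) (pvStepA dep al bm t) = pvStepA dep al (T.foldl (pvStepSd dep) bm) t := by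
  induction T with
  | nil => intro bm t _ _; rfl
  | cons s T ih =>
    intro bm t hnd hp
    simp only [List.foldl_cons]
    rw [pvComm dep al bm t s hnd hp]
    exact ih _ _ (pvNDStepSd dep bm s hnd) (pvPathStepSdMono dep bm s t hp)

theorem pvMainFold (dep : pvD3) (al : PySem.Dict String (List String))
    (T : List (String × String × String)) :
    ∀ (z : pvD1), pvND z →
      T.foldl (pvStepB dep al) z = T.foldl (pvStepA dep al) (T.foldl (pvStepSd dep) z) := by
  induction T with
  | nil => intro z _; rfl
  | cons t T ih =>
    intro z hnd
    simp only [List.foldl_cons]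
    rw [pvStepBeq dep al z t hnd]
    have hndSd := pvNDStepSd dep z t hnd
    rw [ih _ (pvNDStepA dep al _ t hndSd)]
    rw [pvFoldSdComm dep al T _ t hndSd (pvPathStepSdSelf dep z t)]

theorem pvMergeFold (dep : pvD3) (T : List (String × String × String)) :
    ∀ (z : pvD1), pvND z → pvZero z →
      T.foldl (pvStepM dep) z = T.foldl (pvStepSd dep) z := by
  induction T with
  | nil => intro z _ _; rfl
  | cons t T ih =>
    intro z hnd hz
    simp only [List.foldl_cons]
    rw [pvStepMeqSd dep z t hnd hz]
    exact ih _ (pvNDStepSd dep z t hnd) (pvZeroStepSd dep z t hz)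

theorem pvNDEmpty : pvND PySem.Dict.empty := by
  refine ⟨by rw [PySem.Dict.keys_empty]; exact List.nodup_nil, ?_⟩
  intro os d2 h
  rw [PySem.Dict.get?_empty] at h; cases h

theorem pvZeroEmpty : pvZero PySem.Dict.empty := by
  intro os d2 h
  rw [PySem.Dict.get?_empty] at h; cases h

-- the three nested loops, specialized (proved by defeq from pvFoldNestL)
theorem pvNestM (dep : pvD3) (l : List (String × PySem.Dict String (List String))) (z : pvD1) :
    l.foldl (fun bm p => p.2.items.foldl (fun bm q => q.2.foldl (fun bm b =>
        if dep.contains b then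
          pvMerge1 bm (PySem.Dict.ofList [(p.1, PySem.Dict.ofList [(q.1, pvFrame)])])
        else bm) bm) bm) z
      = (l.flatMap (fun p => p.2.items.flatMap (fun q => q.2.map (fun b => (p.1, q.1, b))))).foldl (pvStepM dep) z :=
  pvFoldNestL (pvStepM dep) l z

theorem pvNestA (dep : pvD3) (al : PySem.Dict String (List String)) (l : List (String × PySem.Dict String (List String))) (z : pvD1) :
    l.foldl (fun bm p => p.2.items.foldl (fun bm q => q.2.foldl (fun bm b =>
        if dep.contains b then
          al.items.foldl (fun bm c =>
            if c.2.contains b then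
              let d2 := bm.getD p.1 PySem.Dict.empty
              let d3 := d2.getD q.1 PySem.Dict.empty
              bm.insert p.1 (d2.insert q.1 (d3.insert c.1 (d3.getD c.1 0 + dep.getD b 0)))
            else bm) bm
        else bm) bm) bm) z
      = (l.flatMap (fun p => p.2.items.flatMap (fun q => q.2.map (fun b => (p.1, q.1, b))))).foldl (pvStepA dep al) z :=
  pvFoldNestL (pvStepA dep al) l z

theorem pvNestB (dep : pvD3) (al : PySem.Dict String (List String)) (l : List (String × PySem.Dict String (List String))) (z : pvD1) :
    l.foldl (fun bm p => p.2.items.foldl (fun bm q => q.2.foldl (fun bm b =>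
        if dep.contains b then
          let bm1 := bm.setdefault p.1 PySem.Dict.empty
          let d2 := (bm1.getD p.1 PySem.Dict.empty).setdefault q.1 pvFrame
          let fr := d2.getD q.1 pvFrame
          let cnt := dep.getD b 0
          let fr' := al.items.foldl (fun f c =>
            if c.2.contains b then f.insert c.1 (f.getD c.1 0 + cnt) else f) fr
          bm1.insert p.1 (d2.insert q.1 fr')
        else bm) bm) bm) z
      = (l.flatMap (fun p => p.2.items.flatMap (fun q => q.2.map (fun b => (p.1, q.1, b))))).foldl (pvStepB dep al) z :=
  pvFoldNestL (pvStepB dep al) l z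

-- ===== VERDICT (by name: the statement is the Claim_ definition above) =====
theorem map_allowed_deployed_spec : Claim_equal_map_allowed_deployed := by
  intro dob bab bom _ _
  unfold Spec_map_allowed_deployed
  simp only [map_allowed_deployed, map_allowed_deployed_alt]
  rw [pvNestM, pvNestA, pvNestB,
      pvMergeFold _ _ _ pvNDEmpty pvZeroEmpty,
      pvMainFold _ _ _ _ pvNDEmpty]
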